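-- pv_equiv track=rewrite | github.com/willcravitz/advent-of-code | 2023/03.py | neighbor_squares
-- ===== SOURCE A (Python) =====
-- def neighbor_squares(i: int, j: int, m: int, n: int, num_length) -> list[tuple[int, int]]:
--     neighbors = []
--     left = max(0, j - 1)
--     top = max(0, i - 1)
--     right = min(n - 1, j + num_length)
--     bottom = min(m - 1, i + 1)
--
--     for r in range(top, bottom + 1):
--         for c in range(left, right + 1):
--             if r == i and c in range(j, j + num_length):
--                 continue
--             neighbors.append((r, c))
--
--     return neighbors
-- ===== SOURCE B (Python) =====
-- def neighbor_squares(i: int, j: int, m: int, n: int, num_length) -> list[tuple[int, int]]: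
--     # Build the border region-wise in row-major order: full rows above, the two
--     # flanking segments of row i (cut interval computed by interval arithmetic),
--     # then full rows below.
--     left = max(0, j - 1)
--     top = max(0, i - 1)
--     right = min(n - 1, j + num_length)
--     bottom = min(m - 1, i + 1)
--     cut_lo = max(left, j)
--     cut_hi = min(right, j + num_length - 1)
--     rows_above = [(r, c) for r in range(top, min(i, bottom + 1))
--                   for c in range(left, right + 1)]
--     rows_below = [(r, c) for r in range(max(top, i + 1), bottom + 1)
--                   for c in range(left, right + 1)]
--     if top <= i <= bottom:
--         if cut_lo <= cut_hi:
--             mid = [(i, c) for c in range(left, cut_lo)] + \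
--                   [(i, c) for c in range(cut_hi + 1, right + 1)]
--         else:
--             mid = [(i, c) for c in range(left, right + 1)]
--     else:
--         mid = []
--     return rows_above + mid + rows_below
-- ===== Notes on version B (the rewrite author's own statement) =====
-- stated objective: alternative
-- what changed: Replaces the per-cell scan-and-skip over the whole box with region-wise construction: full rows above and below plus the two flanking column segments of the middle row, computed by interval arithmetic on the clamped cut interval.
import Mathlib
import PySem

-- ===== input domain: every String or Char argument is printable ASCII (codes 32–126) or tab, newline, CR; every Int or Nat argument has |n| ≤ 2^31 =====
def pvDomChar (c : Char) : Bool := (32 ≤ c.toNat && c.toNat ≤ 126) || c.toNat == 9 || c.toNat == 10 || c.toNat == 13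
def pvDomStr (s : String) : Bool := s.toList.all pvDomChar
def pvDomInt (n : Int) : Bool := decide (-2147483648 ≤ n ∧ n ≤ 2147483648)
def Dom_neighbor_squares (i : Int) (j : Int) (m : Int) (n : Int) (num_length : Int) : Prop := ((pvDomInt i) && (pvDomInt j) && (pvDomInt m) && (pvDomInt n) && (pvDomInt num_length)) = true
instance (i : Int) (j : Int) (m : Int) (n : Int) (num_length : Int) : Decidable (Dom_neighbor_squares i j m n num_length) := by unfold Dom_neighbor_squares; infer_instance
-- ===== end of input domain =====

-- B builds the same border cells region-wise (rows above, middle-row flanks, rows below)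
-- instead of A's scan-the-box-and-skip-interior loop; same cost, different decomposition.

-- ===== PORT A =====
def neighbor_squares (i : Int) (j : Int) (m : Int) (n : Int) (num_length : Int) : List (Int × Int) :=
  let left := max 0 (j - 1)
  let top := max 0 (i - 1)
  let right := min (n - 1) (j + num_length)
  let bottom := min (m - 1) (i + 1)
  (PySem.List.pyRange top (bottom + 1) 1).foldl (fun acc r =>
    (PySem.List.pyRange left (right + 1) 1).foldl (fun acc c =>
      if r = i ∧ c ∈ PySem.List.pyRange j (j + num_length) 1 then acc
      else acc ++ [(r, c)]) acc) []

-- ===== PORT B =====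
def neighbor_squares_alt (i : Int) (j : Int) (m : Int) (n : Int) (num_length : Int) : List (Int × Int) :=
  let left := max 0 (j - 1)
  let top := max 0 (i - 1)
  let right := min (n - 1) (j + num_length)
  let bottom := min (m - 1) (i + 1)
  let cutLo := max left j
  let cutHi := min right (j + num_length - 1)
  let rowsAbove := (PySem.List.pyRange top (min i (bottom + 1)) 1).flatMap
    (fun r => (PySem.List.pyRange left (right + 1) 1).map (fun c => (r, c)))
  let rowsBelow := (PySem.List.pyRange (max top (i + 1)) (bottom + 1) 1).flatMap
    (fun r => (PySem.List.pyRange left (right + 1) 1).map (fun c => (r, c)))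
  let mid := if top ≤ i ∧ i ≤ bottom then
      if cutLo ≤ cutHi then
        (PySem.List.pyRange left cutLo 1).map (fun c => (i, c)) ++
        (PySem.List.pyRange (cutHi + 1) (right + 1) 1).map (fun c => (i, c))
      else (PySem.List.pyRange left (right + 1) 1).map (fun c => (i, c))
    else []
  rowsAbove ++ (mid ++ rowsBelow)

-- ===== PRECONDITION & SPEC =====
def Spec_neighbor_squares (i : Int) (j : Int) (m : Int) (n : Int) (num_length : Int) (out : List (Int × Int)) : Prop := out = neighbor_squares_alt i j m n num_length
instance (i : Int) (j : Int) (m : Int) (n : Int) (num_length : Int) (out : List (Int × Int)) : Decidable (Spec_neighbor_squares i j m n num_length out) := by unfold Spec_neighbor_squares; infer_instance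

-- ===== CLAIM (what is proved, stated in full; the proofs are below) =====
def Claim_equal_neighbor_squares : Prop := ∀ (i : Int) (j : Int) (m : Int) (n : Int) (num_length : Int), Dom_neighbor_squares i j m n num_length → Spec_neighbor_squares i j m n num_length (neighbor_squares i j m n num_length)

-- ===== LEMMAS AND PROOFS =====

theorem foldl_skip {α β : Type} (p : α → Prop) [DecidablePred p] (f : α → β)
    (l : List α) (acc : List β) :
    l.foldl (fun a x => if p x then a else a ++ [f x]) acc
      = acc ++ (l.filter (fun x => decide ¬ p x)).map f := by
  induction l generalizing acc with
  | nil => simp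
  | cons x xs ih =>
    by_cases h : p x <;> simp [List.foldl_cons, h, ih]

theorem mid_row_filter (j nl left right : Int) :
    (PySem.List.pyRange left (right + 1) 1).filter (fun c => decide ¬ (j ≤ c ∧ c < j + nl))
    = if max left j ≤ min right (j + nl - 1) then
        PySem.List.pyRange left (max left j) 1
          ++ PySem.List.pyRange (min right (j + nl - 1) + 1) (right + 1) 1
      else PySem.List.pyRange left (right + 1) 1 := by
  by_cases hcut : max left j ≤ min right (j + nl - 1)
  · rw [if_pos hcut]
    have hsplitc : PySem.List.pyRange left (right + 1) 1
        = PySem.List.pyRange left (max left j) 1 ++ (PySem.List.pyRange (max left j) (min right (j + nl - 1) + 1) 1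
          ++ PySem.List.pyRange (min right (j + nl - 1) + 1) (right + 1) 1) := by
      rw [PySem.List.pyRange_one_append left (max left j) (right + 1) (by omega) (by omega),
          PySem.List.pyRange_one_append (max left j) (min right (j + nl - 1) + 1) (right + 1) (by omega) (by omega)]
    rw [hsplitc, List.filter_append, List.filter_append]
    have hkeep1 : (PySem.List.pyRange left (max left j) 1).filter
        (fun c => decide ¬ (j ≤ c ∧ c < j + nl)) = PySem.List.pyRange left (max left j) 1 := by
      apply List.filter_eq_self.mpr
      intro c hc
      have := PySem.List.mem_pyRange_one.mp hc
      simp only [decide_eq_true_eq, not_and, not_lt]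
      omega
    have hdrop : (PySem.List.pyRange (max left j) (min right (j + nl - 1) + 1) 1).filter
        (fun c => decide ¬ (j ≤ c ∧ c < j + nl)) = [] := by
      apply List.filter_eq_nil_iff.mpr
      intro c hc
      have := PySem.List.mem_pyRange_one.mp hc
      simp only [decide_eq_true_eq, not_not]
      omega
    have hkeep2 : (PySem.List.pyRange (min right (j + nl - 1) + 1) (right + 1) 1).filter
        (fun c => decide ¬ (j ≤ c ∧ c < j + nl))
        = PySem.List.pyRange (min right (j + nl - 1) + 1) (right + 1) 1 := by
      apply List.filter_eq_self.mpr
      intro c hc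
      have := PySem.List.mem_pyRange_one.mp hc
      simp only [decide_eq_true_eq, not_and, not_lt]
      omega
    rw [hkeep1, hdrop, hkeep2, List.nil_append]
  · rw [if_neg hcut]
    apply List.filter_eq_self.mpr
    intro c hc
    have := PySem.List.mem_pyRange_one.mp hc
    simp only [decide_eq_true_eq, not_and, not_lt]
    omega

theorem neighbor_squares_spec : Claim_equal_neighbor_squares := by
  intro i j m n num_length _
  unfold Spec_neighbor_squares neighbor_squares neighbor_squares_alt
  simp only []
  set left := max 0 (j - 1) with hleft
  set top := max 0 (i - 1) with htop
  set right := min (n - 1) (j + num_length) with hright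
  set bottom := min (m - 1) (i + 1) with hbottom
  set cutLo := max left j with hcutLo
  set cutHi := min right (j + num_length - 1) with hcutHi
  have hinner : ∀ (acc : List (Int × Int)) (r : Int),
      (PySem.List.pyRange left (right + 1) 1).foldl (fun acc c =>
        if r = i ∧ c ∈ PySem.List.pyRange j (j + num_length) 1 then acc
        else acc ++ [(r, c)]) acc
      = acc ++ ((PySem.List.pyRange left (right + 1) 1).filter
          (fun c => decide ¬ (r = i ∧ c ∈ PySem.List.pyRange j (j + num_length) 1))).map
          (fun c => (r, c)) := by
    intro acc r
    exact foldl_skip _ _ _ _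
  simp only [hinner]
  rw [PySem.List.foldl_append_eq_flatMap, List.nil_append]
  have hfull : ∀ r : Int, r ≠ i →
      ((PySem.List.pyRange left (right + 1) 1).filter
        (fun c => decide ¬ (r = i ∧ c ∈ PySem.List.pyRange j (j + num_length) 1)))
      = PySem.List.pyRange left (right + 1) 1 := by
    intro r hr
    apply List.filter_eq_self.mpr
    intro c _
    simp [hr]
  by_cases hmid : top ≤ i ∧ i ≤ bottom
  · obtain ⟨h1, h2⟩ := hmid
    have hsplit : PySem.List.pyRange top (bottom + 1) 1
        = PySem.List.pyRange top i 1 ++ (PySem.List.pyRange i (i + 1) 1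
          ++ PySem.List.pyRange (i + 1) (bottom + 1) 1) := by
      rw [PySem.List.pyRange_one_append top i (bottom + 1) (by omega) (by omega),
          PySem.List.pyRange_one_append i (i + 1) (bottom + 1) (by omega) (by omega)]
    have hminA : min i (bottom + 1) = i := by omega
    have hmaxB : max top (i + 1) = i + 1 := by omega
    rw [hsplit, List.flatMap_append, List.flatMap_append, hminA, hmaxB, if_pos ⟨h1, h2⟩]
    congr 1
    · apply List.flatMap_congr
      intro r hr
      have := (PySem.List.mem_pyRange_one.mp hr)
      rw [hfull r (by omega)]
    congr 1
    · rw [PySem.List.pyRange_one_singleton]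
      simp only [List.flatMap_cons, List.flatMap_nil, List.append_nil]
      rw [List.filter_congr (l := PySem.List.pyRange left (right + 1) 1)
        (q := fun c => decide ¬ (j ≤ c ∧ c < j + num_length))
        (fun c _ => by simp [PySem.List.mem_pyRange_one])]
      rw [mid_row_filter j num_length left right, ← hcutLo, ← hcutHi]
      by_cases hcut : cutLo ≤ cutHi
      · rw [if_pos hcut, if_pos hcut, List.map_append]
      · rw [if_neg hcut, if_neg hcut]
    · apply List.flatMap_congr
      intro r hr
      have := (PySem.List.mem_pyRange_one.mp hr)
      rw [hfull r (by omega)]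
  · rw [if_neg hmid]
    have hi : i < top ∨ bottom < i := by omega
    have hall : ∀ r ∈ PySem.List.pyRange top (bottom + 1) 1,
        ((PySem.List.pyRange left (right + 1) 1).filter
          (fun c => decide ¬ (r = i ∧ c ∈ PySem.List.pyRange j (j + num_length) 1))).map
          (fun c => (r, c))
        = (PySem.List.pyRange left (right + 1) 1).map (fun c => (r, c)) := by
      intro r hr
      have := (PySem.List.mem_pyRange_one.mp hr)
      rw [hfull r (by omega)]
    rw [List.flatMap_congr hall]
    rcases hi with hlt | hgt
    · have h1 : PySem.List.pyRange top (min i (bottom + 1)) 1 = [] :=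
        PySem.List.pyRange_one_eq_nil (by omega)
      have h2 : max top (i + 1) = top := by omega
      rw [h1, h2]
      simp
    · have h1 : min i (bottom + 1) = bottom + 1 := by omega
      have h2 : PySem.List.pyRange (max top (i + 1)) (bottom + 1) 1 = [] :=
        PySem.List.pyRange_one_eq_nil (by omega)
      rw [h1, h2]
      simp

-- ===== VERDICT (by name: the statement is the Claim_ definition above) =====
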